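-- pv_equiv track=rewrite | github.com/orca-eaa5a/coding-test | backjoon/12919.py | bfs
-- ===== SOURCE A (Python) =====
-- def bfs(S, T):
--     slen = len(S)
--     q = set()
--     q.add((T, len(T)))
--     while q:
--         v = next(iter(q))
--         q.discard(v)
--         t, l = v
--         if slen > l:
--             continue
--         elif slen == l:
--             if t == S:
--                 return 1
--             continue
--         else:
--             for op in ['a', 'b']:
--                 if t[-1] == 'A':
--                     q.add((t[:-1], l-1))
--                 if t[0] == 'B':
--                     q.add((t[1:][::-1], l-1))
--     return 0
-- ===== SOURCE B (Python) =====
-- def bfs(S, T):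
--     if len(S) > len(T):
--         return 0
--     if len(S) == len(T):
--         return 1 if T == S else 0
--     if T[-1] == 'A' and bfs(S, T[:-1]) == 1:
--         return 1
--     if T[0] == 'B' and bfs(S, T[1:][::-1]) == 1:
--         return 1
--     return 0
-- ===== Notes on version B (the rewrite author's own statement) =====
-- stated objective: simpler
-- what changed: A's iterative worklist search over a mutable set of pending strings is replaced by a direct recursive DFS on T (try dropping a trailing 'A', else dropping a leading 'B' and reversing), with no set or queue maintained.
import Mathlib
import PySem

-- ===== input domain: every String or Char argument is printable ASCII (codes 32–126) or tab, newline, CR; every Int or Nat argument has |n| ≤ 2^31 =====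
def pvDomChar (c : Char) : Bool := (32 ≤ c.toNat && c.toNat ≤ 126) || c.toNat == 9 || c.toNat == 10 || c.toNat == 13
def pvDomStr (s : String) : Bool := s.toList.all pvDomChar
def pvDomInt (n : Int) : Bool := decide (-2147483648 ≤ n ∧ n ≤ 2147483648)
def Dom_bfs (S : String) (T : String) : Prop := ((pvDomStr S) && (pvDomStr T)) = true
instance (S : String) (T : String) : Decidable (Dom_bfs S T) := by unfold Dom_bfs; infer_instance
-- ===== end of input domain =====

-- B replaces A's worklist search over a Python set by a direct recursive DFS on T
-- (different decomposition: no set/queue is maintained; the call stack replaces it).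

-- ===== PORT A =====
-- A's worklist holds pairs (t, l) with l = len(t), as the Python does.
-- one body of A's inner 'for op in ["a","b"]' loop: the two conditional q.add(...)
--   t[-1] is PySem.List.pyGet? t (-1); t[:-1] is PySem.List.slice t none (some (-1));
--   t[1:] is PySem.List.slice t (some 1) none and [::-1] is .reverse
--   (exact by PySem.List.slice?_none_none_neg_one).
def pvStep (q : PySem.Set (List Char × Int)) (t : List Char) (l : Int) :
    PySem.Set (List Char × Int) :=
  let q1 := if PySem.List.pyGet? t (-1) == some 'A'
            then PySem.Set.add q (PySem.List.slice t none (some (-1)), l - 1) else q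
  if PySem.List.pyGet? t 0 == some 'B'
  then PySem.Set.add q1 ((PySem.List.slice t (some 1) none).reverse, l - 1) else q1

-- termination measure for A's while loop: Σ_{(t,l) ∈ q} 3^len(t)
def pvMeas (q : List (List Char × Int)) : Nat := (q.map (fun p => 3 ^ p.1.length)).sum

lemma pvMeas_cons (v : List Char × Int) (rest : List (List Char × Int)) :
    pvMeas (v :: rest) = 3 ^ v.1.length + pvMeas rest := by
  simp [pvMeas]

lemma pvMeas_add_le (s : PySem.Set (List Char × Int)) (x : List Char × Int) :
    pvMeas (PySem.Set.add s x) ≤ pvMeas s + 3 ^ x.1.length := by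
  unfold PySem.Set.add
  split
  · exact Nat.le_add_right _ _
  · simp [pvMeas]

lemma pvSet_add_self (s : PySem.Set (List Char × Int)) (x : List Char × Int)
    (hx : x ∈ s) : PySem.Set.add s x = s := by
  unfold PySem.Set.add
  simp only [PySem.Set.contains, List.contains_eq_mem, hx, decide_true, if_true]

lemma pvMem_step_iff (s : PySem.Set (List Char × Int)) (t : List Char) (l : Int)
    (p : List Char × Int) :
    p ∈ pvStep s t l ↔ p ∈ s
      ∨ ((PySem.List.pyGet? t (-1) == some 'A') = true
          ∧ p = (PySem.List.slice t none (some (-1)), l - 1))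
      ∨ ((PySem.List.pyGet? t 0 == some 'B') = true
          ∧ p = ((PySem.List.slice t (some 1) none).reverse, l - 1)) := by
  simp only [pvStep]
  split_ifs with h2 h1 h1 <;> (first
    | (simp [PySem.Set.mem_add, h1, h2]; tauto)
    | simp [PySem.Set.mem_add, h1, h2])

-- the second iteration of A's 'for op' loop adds nothing new (the set dedups)
lemma pvStep_idem (s : PySem.Set (List Char × Int)) (t : List Char) (l : Int) :
    pvStep (pvStep s t l) t l = pvStep s t l := by
  have hm1 : (PySem.List.pyGet? t (-1) == some 'A') = true →
      (PySem.List.slice t none (some (-1)), l - 1) ∈ pvStep s t l := by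
    intro h; rw [pvMem_step_iff]; tauto
  have hm2 : (PySem.List.pyGet? t 0 == some 'B') = true →
      ((PySem.List.slice t (some 1) none).reverse, l - 1) ∈ pvStep s t l := by
    intro h; rw [pvMem_step_iff]; tauto
  set s' := pvStep s t l with hs'
  simp only [pvStep]
  split_ifs with h2 h1 h1
  · rw [pvSet_add_self s' _ (hm1 h1), pvSet_add_self s' _ (hm2 h2)]
  · rw [pvSet_add_self s' _ (hm2 h2)]
  · rw [pvSet_add_self s' _ (hm1 h1)]
  · rfl

lemma pvMeas_step_lt (s : PySem.Set (List Char × Int)) (t : List Char) (l : Int) :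
    pvMeas (pvStep s t l) < 3 ^ t.length + pvMeas s := by
  have hpos : 0 < 3 ^ t.length := by positivity
  rcases eq_or_ne t [] with rfl | ht
  · simp only [pvStep, PySem.List.pyGet?]
    norm_num
  · have hlen : 1 ≤ t.length := by
      cases t with | nil => exact absurd rfl ht | cons a b => simp
    have hc1 : (PySem.List.slice t none (some (-1))).length = t.length - 1 := by
      rw [PySem.List.slice_to_neg_one]; simp
    have hc2 : ((PySem.List.slice t (some 1) none).reverse).length = t.length - 1 := by
      rw [PySem.List.slice_from_one]; simp
    have hpow : 2 * 3 ^ (t.length - 1) < 3 ^ t.length := by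
      have h3 : 3 ^ t.length = 3 ^ (t.length - 1) * 3 := by
        rw [← pow_succ]; congr 1; omega
      have hp : 0 < 3 ^ (t.length - 1) := by positivity
      omega
    simp only [pvStep]
    split_ifs with h2 h1 h1
    · have a1 := pvMeas_add_le (PySem.Set.add s (PySem.List.slice t none (some (-1)), l - 1))
        ((PySem.List.slice t (some 1) none).reverse, l - 1)
      have a2 := pvMeas_add_le s (PySem.List.slice t none (some (-1)), l - 1)
      dsimp only at a1 a2
      rw [hc2] at a1; rw [hc1] at a2
      omega
    · have a1 := pvMeas_add_le s ((PySem.List.slice t (some 1) none).reverse, l - 1)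
      dsimp only at a1
      rw [hc2] at a1
      omega
    · have a2 := pvMeas_add_le s (PySem.List.slice t none (some (-1)), l - 1)
      dsimp only at a2
      rw [hc1] at a2
      omega
    · omega

-- A's while loop; next(iter(q)) takes SOME element of the set (iteration order is not
-- modelled by PySem) — here the first; the return value is order-independent, which is
-- exactly what the equivalence theorem below proves (it equals a canonical DFS).
def pvLoopA (slen : Int) (S : List Char) (q : PySem.Set (List Char × Int)) : Int :=
  match q with
  | [] => 0
  | v :: rest =>
    if slen > v.2 then pvLoopA slen S rest
    else if slen = v.2 then
      if v.1 = S then 1 else pvLoopA slen S rest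
    else
      -- for op in ['a', 'b']: the body runs twice, unchanged
      pvLoopA slen S (pvStep (pvStep rest v.1 v.2) v.1 v.2)
termination_by pvMeas q
decreasing_by
  · rw [pvMeas_cons]; have : 0 < 3 ^ v.1.length := by positivity
    omega
  · rw [pvMeas_cons]; have : 0 < 3 ^ v.1.length := by positivity
    omega
  · rw [pvStep_idem, pvMeas_cons]
    exact pvMeas_step_lt rest v.1 v.2

def bfs (S : String) (T : String) : Int :=
  pvLoopA (PySem.Str.len S) S.toList
    (PySem.Set.add PySem.Set.empty (T.toList, PySem.Str.len T))

-- ===== PORT B =====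
-- recursive DFS of Source B, on the character lists (same PySem slice/index primitives)
def pvDfs (S T : List Char) : Int :=
  if S.length > T.length then 0
  else if S.length = T.length then (if T = S then 1 else 0)
  else if PySem.List.pyGet? T (-1) == some 'A'
          && pvDfs S (PySem.List.slice T none (some (-1))) == 1 then 1
  else if PySem.List.pyGet? T 0 == some 'B'
          && pvDfs S (PySem.List.slice T (some 1) none).reverse == 1 then 1
  else 0
termination_by T.length
decreasing_by
  · rw [PySem.List.slice_to_neg_one]
    simp only [List.length_dropLast]; omega
  · rw [PySem.List.slice_from_one]
    simp only [List.length_reverse, List.length_tail]; omega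

def bfs_alt (S : String) (T : String) : Int := pvDfs S.toList T.toList

-- ===== PRECONDITION & SPEC =====
def Spec_bfs (S : String) (T : String) (out : Int) : Prop := out = bfs_alt S T
instance (S : String) (T : String) (out : Int) : Decidable (Spec_bfs S T out) := by unfold Spec_bfs; infer_instance

-- ===== CLAIM (what is proved, stated in full; the proofs are below) =====
def Claim_equal_bfs : Prop := ∀ (S : String) (T : String), Dom_bfs S T → Spec_bfs S T (bfs S T)

-- ===== LEMMAS AND PROOFS =====

lemma pvDfs_zero_or_one (S T : List Char) : pvDfs S T = 0 ∨ pvDfs S T = 1 := by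
  unfold pvDfs
  split_ifs <;> simp

lemma pvDfs_of_lt (S T : List Char) (h : T.length < S.length) : pvDfs S T = 0 := by
  unfold pvDfs
  split_ifs with h1 <;> [rfl; omega]

lemma pvDfs_of_len_eq (S T : List Char) (h : T.length = S.length) :
    pvDfs S T = if T = S then 1 else 0 := by
  unfold pvDfs
  split_ifs <;> first | rfl | omega

lemma pvDfs_else_iff (S T : List Char) (h : S.length < T.length) :
    pvDfs S T = 1 ↔
      ((PySem.List.pyGet? T (-1) == some 'A') = true
        ∧ pvDfs S (PySem.List.slice T none (some (-1))) = 1)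
      ∨ ((PySem.List.pyGet? T 0 == some 'B') = true
        ∧ pvDfs S (PySem.List.slice T (some 1) none).reverse = 1) := by
  rw [pvDfs, if_neg (by omega), if_neg (by omega)]
  split_ifs with hA hB
  · simp only [Bool.and_eq_true, beq_iff_eq] at hA
    exact iff_of_true rfl (Or.inl ⟨by simp [hA.1], hA.2⟩)
  · simp only [Bool.and_eq_true, beq_iff_eq] at hB
    exact iff_of_true rfl (Or.inr ⟨by simp [hB.1], hB.2⟩)
  · simp only [Bool.and_eq_true, beq_iff_eq, not_and] at hA hB
    constructor
    · omega
    · rintro (⟨hc, hd⟩ | ⟨hc, hd⟩)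
      · exact absurd hd (hA (by simpa using hc))
      · exact absurd hd (hB (by simpa using hc))

lemma pvLoopA_correct (S : List Char) (q : PySem.Set (List Char × Int))
    (hq : ∀ p ∈ q, p.2 = (p.1.length : Int)) :
    pvLoopA (S.length : Int) S q = if ∃ p ∈ q, pvDfs S p.1 = 1 then 1 else 0 := by
  induction hm : pvMeas q using Nat.strong_induction_on generalizing q with
  | _ m IH =>
  subst hm
  match q with
  | [] => rw [pvLoopA]; simp
  | v :: rest =>
    have hv : v.2 = (v.1.length : Int) := hq v (by simp)
    have hrest : ∀ p ∈ rest, p.2 = (p.1.length : Int) := fun p hp => hq p (by simp [hp])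
    have hmeas_rest : pvMeas rest < pvMeas (v :: rest) := by
      rw [pvMeas_cons]; have : 0 < 3 ^ v.1.length := by positivity
      omega
    rw [pvLoopA]
    by_cases h1 : (S.length : Int) > v.2
    · -- slen > l : len v.1 < len S, so pvDfs S v.1 = 0
      rw [if_pos h1, IH _ hmeas_rest rest hrest rfl]
      have hlt : v.1.length < S.length := by omega
      have h0 : pvDfs S v.1 ≠ 1 := by rw [pvDfs_of_lt S v.1 hlt]; omega
      refine if_congr ?_ rfl rfl
      simp only [List.mem_cons]
      constructor
      · rintro ⟨p, hp, hd⟩; exact ⟨p, Or.inr hp, hd⟩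
      · rintro ⟨p, (rfl | hp), hd⟩
        · exact absurd hd h0
        · exact ⟨p, hp, hd⟩
    · rw [if_neg h1]
      by_cases h2 : (S.length : Int) = v.2
      · rw [if_pos h2]
        have hlen : v.1.length = S.length := by omega
        by_cases h3 : v.1 = S
        · rw [if_pos h3]
          have hd1 : pvDfs S v.1 = 1 := by
            rw [pvDfs_of_len_eq S v.1 hlen, if_pos h3]
          exact (if_pos ⟨v, by simp, hd1⟩).symm
        · rw [if_neg h3, IH _ hmeas_rest rest hrest rfl]
          have h0 : pvDfs S v.1 ≠ 1 := by
            rw [pvDfs_of_len_eq S v.1 hlen, if_neg h3]; omega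
          refine if_congr ?_ rfl rfl
          simp only [List.mem_cons]
          constructor
          · rintro ⟨p, hp, hd⟩; exact ⟨p, Or.inr hp, hd⟩
          · rintro ⟨p, (rfl | hp), hd⟩
            · exact absurd hd h0
            · exact ⟨p, hp, hd⟩
      · -- slen < l : expand both ops, use the DFS unfolding
        rw [if_neg h2, pvStep_idem]
        have hlt : S.length < v.1.length := by omega
        have hne : v.1 ≠ [] := by
          intro h; rw [h] at hlt; simp at hlt
        have hmeas : pvMeas (pvStep rest v.1 v.2) < pvMeas (v :: rest) := by
          rw [pvMeas_cons]; exact pvMeas_step_lt rest v.1 v.2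
        have hq' : ∀ p ∈ pvStep rest v.1 v.2, p.2 = (p.1.length : Int) := by
          intro p hp
          rcases (pvMem_step_iff rest v.1 v.2 p).mp hp with hp | ⟨_, rfl⟩ | ⟨_, rfl⟩
          · exact hrest p hp
          · simp only [PySem.List.slice_to_neg_one, List.length_dropLast]
            omega
          · simp only [PySem.List.slice_from_one, List.length_reverse, List.length_tail]
            omega
        rw [IH _ hmeas _ hq' rfl]
        refine if_congr ?_ rfl rfl
        constructor
        · rintro ⟨p, hp, hd⟩
          rcases (pvMem_step_iff rest v.1 v.2 p).mp hp with hp' | ⟨hc, rfl⟩ | ⟨hc, rfl⟩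
          · exact ⟨p, by simp [hp'], hd⟩
          · exact ⟨v, by simp, (pvDfs_else_iff S v.1 hlt).mpr (Or.inl ⟨hc, hd⟩)⟩
          · exact ⟨v, by simp, (pvDfs_else_iff S v.1 hlt).mpr (Or.inr ⟨hc, hd⟩)⟩
        · rintro ⟨p, hp, hd⟩
          simp only [List.mem_cons] at hp
          rcases hp with rfl | hp
          · rcases (pvDfs_else_iff S p.1 hlt).mp hd with ⟨hc, hd'⟩ | ⟨hc, hd'⟩
            · exact ⟨_, (pvMem_step_iff rest p.1 p.2 _).mpr (Or.inr (Or.inl ⟨hc, rfl⟩)), hd'⟩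
            · exact ⟨_, (pvMem_step_iff rest p.1 p.2 _).mpr (Or.inr (Or.inr ⟨hc, rfl⟩)), hd'⟩
          · exact ⟨p, (pvMem_step_iff rest v.1 v.2 p).mpr (Or.inl hp), hd⟩

-- ===== VERDICT (by name: the statement is the Claim_ definition above) =====
theorem bfs_spec : Claim_equal_bfs := by
  intro S T _
  unfold Spec_bfs bfs bfs_alt
  have hset : PySem.Set.add (PySem.Set.empty : PySem.Set (List Char × Int))
      (T.toList, PySem.Str.len T) = [(T.toList, PySem.Str.len T)] := rfl
  rw [hset, PySem.Str.len_eq, PySem.Str.len_eq]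
  rw [pvLoopA_correct S.toList [(T.toList, (T.toList.length : Int))]
        (by rintro p hp; simp only [List.mem_singleton] at hp; subst hp; rfl)]
  rcases pvDfs_zero_or_one S.toList T.toList with h | h <;> simp [h]
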